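-- pv_equiv track=rewrite | github.com/charliek/devproxy | src/devproxy/services/hosts_service.py | _find_managed_block
-- ===== SOURCE A (Python) =====
-- BEGIN_MARKER = "# BEGIN devproxy managed block"
--
-- END_MARKER = "# END devproxy managed block"
--
-- class HostsFileError(Exception):
--     """Raised when hosts file operations fail."""
--
--     pass
--
-- def _find_managed_block(lines: list[str]) -> tuple[int | None, int | None]:
--     """Find the start and end indices of the managed block.
--
--     Args:
--         lines: Lines from the hosts file.
--
--     Returns:
--         Tuple of (start_index, end_index), either can be None if not found.
--
--     Raises:
--         HostsFileError: If the hosts file has unpaired markers (corrupted).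
--     """
--     start_idx = None
--     end_idx = None
--
--     for i, line in enumerate(lines):
--         if line.strip() == BEGIN_MARKER:
--             start_idx = i
--         elif line.strip() == END_MARKER:
--             end_idx = i
--             break
--
--     # Validate markers are paired
--     if start_idx is not None and end_idx is None:
--         raise HostsFileError(
--             f"Corrupted hosts file: found BEGIN marker at line {start_idx + 1} "
--             "but no END marker. Please manually fix the file by adding "
--             f"'{END_MARKER}' or removing the incomplete block."
--         )
--
--     return start_idx, end_idx
-- ===== SOURCE B (Python) =====
-- BEGIN_MARKER = "# BEGIN devproxy managed block"
-- END_MARKER = "# END devproxy managed block"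
--
--
-- class HostsFileError(Exception):
--     """Raised when hosts file operations fail."""
--
--     pass
--
--
-- def _find_managed_block(lines):
--     # Locate the first END marker, then search only the prefix before it
--     # for the last BEGIN marker.
--     end_idx = next((i for i, line in enumerate(lines) if line.strip() == END_MARKER), None)
--     if end_idx is None:
--         bad = next((i for i, line in enumerate(lines) if line.strip() == BEGIN_MARKER), None)
--         if bad is not None:
--             raise HostsFileError(
--                 f"Corrupted hosts file: found BEGIN marker at line {bad + 1} "
--                 "but no END marker. Please manually fix the file by adding "
--                 f"'{END_MARKER}' or removing the incomplete block."
--             )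
--         return None, None
--     start_idx = max(
--         (i for i, line in enumerate(lines[:end_idx]) if line.strip() == BEGIN_MARKER),
--         default=None,
--     )
--     return start_idx, end_idx
-- ===== Notes on version B (the rewrite author's own statement) =====
-- stated objective: alternative
-- what changed: Replaces A's single stateful early-exit scan (tracking the last BEGIN, breaking at END) with a locate-then-prefix-search decomposition: first find the first END marker, then take the max BEGIN index in the prefix before it; the unpaired-BEGIN error is raised from a separate whole-list search only when no END exists.
import Mathlib
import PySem

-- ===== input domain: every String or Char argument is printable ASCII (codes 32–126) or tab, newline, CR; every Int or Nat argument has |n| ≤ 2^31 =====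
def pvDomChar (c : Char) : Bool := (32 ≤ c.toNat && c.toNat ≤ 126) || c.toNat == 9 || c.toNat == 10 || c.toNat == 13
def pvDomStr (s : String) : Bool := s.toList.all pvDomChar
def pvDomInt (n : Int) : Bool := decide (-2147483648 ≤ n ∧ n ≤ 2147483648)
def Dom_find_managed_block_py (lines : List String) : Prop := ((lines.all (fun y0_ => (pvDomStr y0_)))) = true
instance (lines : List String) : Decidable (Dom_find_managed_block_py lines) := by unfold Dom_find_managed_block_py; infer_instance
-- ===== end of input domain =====

-- B replaces A's single stateful early-exit scan by a locate-first-END / max-BEGIN-in-prefix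
-- decomposition (objective: alternative). Equality of RETURN values is proved on Pre_ (where A
-- returns normally); where A raises HostsFileError, B raises too.

def pvBEGIN : String := "# BEGIN devproxy managed block"
def pvEND : String := "# END devproxy managed block"

-- ===== PORT A =====
-- for i, line in enumerate(lines): BEGIN sets start_idx; END sets end_idx and breaks.
def pvALoop (k : Int) (s : Option Int) : List String → Option Int × Option Int
  | [] => (s, none)
  | l :: rest =>
    if PySem.Str.strip l = pvBEGIN then pvALoop (k + 1) (some k) rest
    else if PySem.Str.strip l = pvEND then (s, some k)
    else pvALoop (k + 1) s rest

-- Python raises HostsFileError when start_idx is some and end_idx is none; those inputs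
-- are excluded by Pre_find_managed_block_py, so the port just returns the pair.
def find_managed_block_py (lines : List String) : Option Int × Option Int :=
  pvALoop 0 none lines

-- ===== PORT B =====
-- next((i for i, line in enumerate(lines) if line.strip() == END_MARKER), None)
def pvFirstEnd (k : Int) : List String → Option Int
  | [] => none
  | l :: rest => if PySem.Str.strip l = pvEND then some k else pvFirstEnd (k + 1) rest

-- max((i for i, line in enumerate(pfx) if line.strip() == BEGIN_MARKER), default=None)
def pvMaxBegin (k : Int) (acc : Option Int) : List String → Option Int
  | [] => acc
  | l :: rest =>
    pvMaxBegin (k + 1)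
      (if PySem.Str.strip l = pvBEGIN then
        (match acc with | none => some k | some m => some (max m k))
      else acc) rest

-- In the end_idx-is-None branch, Python B raises HostsFileError when a BEGIN exists
-- (excluded by Pre_find_managed_block_py) and otherwise returns (None, None).
def find_managed_block_py_alt (lines : List String) : Option Int × Option Int :=
  match pvFirstEnd 0 lines with
  | none => (none, none)
  | some e => (pvMaxBegin 0 none (PySem.List.slice lines (some 0) (some e)), some e)

-- ===== PRECONDITION & SPEC =====
-- Pre_ excludes exactly the inputs where A raises HostsFileError: a BEGIN marker present
-- but no END marker anywhere (B raises the same exception there).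
def Pre_find_managed_block_py (lines : List String) : Prop :=
  (∀ l ∈ lines, PySem.Str.strip l ≠ pvBEGIN) ∨ (∃ l ∈ lines, PySem.Str.strip l = pvEND)
instance (lines : List String) : Decidable (Pre_find_managed_block_py lines) := by
  unfold Pre_find_managed_block_py; infer_instance

def pvWitness_find_managed_block_py : List String :=
  ["x", "# BEGIN devproxy managed block", "# END devproxy managed block"]

def Spec_find_managed_block_py (lines : List String) (out : Option Int × Option Int) : Prop := out = find_managed_block_py_alt lines
instance (lines : List String) (out : Option Int × Option Int) : Decidable (Spec_find_managed_block_py lines out) := by unfold Spec_find_managed_block_py; infer_instance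

-- ===== CLAIM (what is proved, stated in full; the proofs are below) =====
def Claim_equal_find_managed_block_py : Prop := ∀ (lines : List String), Dom_find_managed_block_py lines → Pre_find_managed_block_py lines → Spec_find_managed_block_py lines (find_managed_block_py lines)

-- ===== LEMMAS AND PROOFS =====

theorem pvWitness_ok :
    Dom_find_managed_block_py pvWitness_find_managed_block_py ∧
    Pre_find_managed_block_py pvWitness_find_managed_block_py := by decide

theorem pvBEGIN_ne_pvEND : pvBEGIN ≠ pvEND := by decide

theorem firstEnd_ge (ls : List String) : ∀ (k e : Int), pvFirstEnd k ls = some e → k ≤ e := by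
  induction ls with
  | nil => intro k e h; simp [pvFirstEnd] at h
  | cons l rest ih =>
    intro k e h
    simp only [pvFirstEnd] at h
    split at h
    · injection h with h; omega
    · have := ih (k + 1) e h; omega

theorem firstEnd_ge' (ls : List String) (k e : Int) (h : pvFirstEnd k ls = some e) : k ≤ e :=
  firstEnd_ge ls k e h

theorem firstEnd_none_no_end (ls : List String) :
    ∀ (k : Int), pvFirstEnd k ls = none → ∀ l ∈ ls, PySem.Str.strip l ≠ pvEND := by
  induction ls with
  | nil => intro k _ l hl; simp at hl
  | cons x rest ih =>
    intro k h l hl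
    simp only [pvFirstEnd] at h
    split at h
    · exact absurd h (by simp)
    · rcases List.mem_cons.mp hl with rfl | hl
      · assumption
      · exact ih (k + 1) h l hl

theorem maxBegin_no_begin (ls : List String) :
    ∀ (k : Int) (acc : Option Int), (∀ l ∈ ls, PySem.Str.strip l ≠ pvBEGIN) →
      pvMaxBegin k acc ls = acc := by
  induction ls with
  | nil => intro k acc _; rfl
  | cons x rest ih =>
    intro k acc h
    simp only [pvMaxBegin]
    rw [if_neg (h x (by simp))]
    exact ih (k + 1) acc (fun l hl => h l (by simp [hl]))

-- Main invariant: A's loop equals B's decomposition, for any start index k and any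
-- accumulator holding only indices < k.
theorem main_inv (ls : List String) :
    ∀ (k : Int) (acc : Option Int), (∀ m, acc = some m → m < k) →
      pvALoop k acc ls =
        match pvFirstEnd k ls with
        | none => (pvMaxBegin k acc ls, none)
        | some e => (pvMaxBegin k acc (ls.take (e - k).toNat), some e) := by
  induction ls with
  | nil => intro k acc _; rfl
  | cons l rest ih =>
    intro k acc hacc
    by_cases hb : PySem.Str.strip l = pvBEGIN
    · have hne : ¬ PySem.Str.strip l = pvEND := by rw [hb]; exact pvBEGIN_ne_pvEND
      have hacc' : ∀ m, (some k : Option Int) = some m → m < k + 1 := by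
        intro m hm; cases hm; omega
      simp only [pvALoop, pvFirstEnd, if_pos hb, if_neg hne]
      rw [ih (k + 1) (some k) hacc']
      cases he : pvFirstEnd (k + 1) rest with
      | none =>
        simp only [pvMaxBegin, if_pos hb]
        cases acc with
        | none => rfl
        | some m => simp [max_eq_right (le_of_lt (hacc m rfl))]
      | some e =>
        have hke : k + 1 ≤ e := firstEnd_ge' rest (k + 1) e he
        have htake : (e - k).toNat = (e - (k + 1)).toNat + 1 := by omega
        simp only [htake, List.take_succ_cons, pvMaxBegin, if_pos hb]
        cases acc with
        | none => rfl
        | some m => simp [max_eq_right (le_of_lt (hacc m rfl))]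
    · by_cases hend : PySem.Str.strip l = pvEND
      · simp only [pvALoop, pvFirstEnd, if_neg hb, if_pos hend]
        simp [pvMaxBegin]
      · have hacc' : ∀ m, acc = some m → m < k + 1 := by
          intro m hm; have := hacc m hm; omega
        simp only [pvALoop, pvFirstEnd, if_neg hb, if_neg hend]
        rw [ih (k + 1) acc hacc']
        cases he : pvFirstEnd (k + 1) rest with
        | none =>
          simp only [pvMaxBegin, if_neg hb]
        | some e =>
          have hke : k + 1 ≤ e := firstEnd_ge' rest (k + 1) e he
          have htake : (e - k).toNat = (e - (k + 1)).toNat + 1 := by omega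
          simp only [htake, List.take_succ_cons, pvMaxBegin, if_neg hb]

-- ===== VERDICT (by name: the statement is the Claim_ definition above) =====
theorem find_managed_block_py_spec : Claim_equal_find_managed_block_py := by
  intro lines _ hpre
  unfold Spec_find_managed_block_py find_managed_block_py find_managed_block_py_alt
  rw [main_inv lines 0 none (by intro m hm; cases hm)]
  cases he : pvFirstEnd 0 lines with
  | none =>
    have hnoEnd := firstEnd_none_no_end lines 0 he
    have hnoBegin : ∀ l ∈ lines, PySem.Str.strip l ≠ pvBEGIN := by
      rcases hpre with h | ⟨l, hl, hsl⟩
      · exact h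
      · exact absurd hsl (hnoEnd l hl)
    simp [maxBegin_no_begin lines 0 none hnoBegin]
  | some e =>
    have h0e : (0 : Int) ≤ e := firstEnd_ge' lines 0 e he
    have hslice : PySem.List.slice lines (some 0) (some e) = lines.take (e - 0).toNat := by
      rw [PySem.List.slice_zero_start, PySem.List.slice_to lines h0e]
      congr 1; omega
    simp [hslice]
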